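-- pv_equiv track=rewrite | github.com/earnestt1234/nifti_overlay | nifti_overlay/__main__.py | parse_ordered_image_args
-- ===== SOURCE A (Python) =====
-- def parse_ordered_image_args(ordered_args):
--
--     image_flags = {'anat', 'checker', 'mask'}
--     current_image = None
--     images = []
--
--     for key, value in ordered_args:
--
--         if key in image_flags:
--
--             if current_image is not None:
--                 images.append(current_image)
--
--             current_image = {}
--             current_image['type'] = key
--             current_image['path'] = value
--
--         else:
--
--             if current_image is not None:
--                 current_image[key] = value
--
--     if current_image is not None:
--         images.append(current_image)
--
--     return images
-- ===== SOURCE B (Python) =====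
-- def parse_ordered_image_args(ordered_args):
--     # Two-pass decomposition: first group the args into segments (one per image
--     # flag, dropping anything before the first flag), then turn each segment
--     # into its dict.
--     image_flags = {'anat', 'checker', 'mask'}
--
--     segments = []
--     for kv in ordered_args:
--         if kv[0] in image_flags:
--             segments.append([kv])
--         elif segments:
--             segments[-1].append(kv)
--
--     images = []
--     for seg in segments:
--         (flag_key, flag_value) = seg[0]
--         image = {'type': flag_key, 'path': flag_value}
--         for key, value in seg[1:]:
--             image[key] = value
--         images.append(image)
--     return images
-- ===== Notes on version B (the rewrite author's own statement) =====
-- stated objective: alternative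
-- what changed: Replaces A's single interleaved loop carrying an optional current dict with an explicit two-pass structure: first group the (key,value) pairs into per-flag segments, then map each segment to its dict.
import Mathlib
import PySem

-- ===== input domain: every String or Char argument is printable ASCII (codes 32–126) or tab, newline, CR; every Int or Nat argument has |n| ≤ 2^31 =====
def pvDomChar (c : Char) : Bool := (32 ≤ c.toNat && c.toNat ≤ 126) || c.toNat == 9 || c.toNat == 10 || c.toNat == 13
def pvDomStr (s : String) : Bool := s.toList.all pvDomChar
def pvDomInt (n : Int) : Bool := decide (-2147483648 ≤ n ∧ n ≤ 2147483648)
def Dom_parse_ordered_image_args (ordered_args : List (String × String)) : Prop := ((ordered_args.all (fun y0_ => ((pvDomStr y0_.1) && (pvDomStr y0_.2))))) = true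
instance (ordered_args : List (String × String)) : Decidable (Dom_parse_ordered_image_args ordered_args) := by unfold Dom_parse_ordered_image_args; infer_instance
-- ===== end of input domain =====

-- B replaces A's single interleaved loop (optional current dict + result list) with an
-- explicit two-pass structure: group the args into per-flag segments, then map each
-- segment to its dict; objective: alternative decomposition, same cost.


-- ===== PORT A =====
-- loop body of A: state = (current_image, images)
def pvStepA (st : Option (PySem.Dict String String) × List (PySem.Dict String String))
    (kv : String × String) : Option (PySem.Dict String String) × List (PySem.Dict String String) :=
  if (PySem.Set.ofList ["anat", "checker", "mask"]).contains kv.1 then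
    let images := match st.1 with
      | none => st.2
      | some d => st.2 ++ [d]
    (some ((PySem.Dict.empty.insert "type" kv.1).insert "path" kv.2), images)
  else
    match st.1 with
    | none => st
    | some d => (some (d.insert kv.1 kv.2), st.2)

-- final 'if current_image is not None: images.append(current_image)'
def pvFinishA (st : Option (PySem.Dict String String) × List (PySem.Dict String String)) :
    List (PySem.Dict String String) :=
  match st.1 with
  | none => st.2
  | some d => st.2 ++ [d]

def parse_ordered_image_args (ordered_args : List (String × String)) : List (List (String × String)) :=
  (pvFinishA (ordered_args.foldl pvStepA (none, []))).map PySem.Dict.items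

-- ===== PORT B =====
-- phase 1 loop body: start a new segment on a flag, else append to segments[-1] if any
def pvSegStep (segs : List (List (String × String))) (kv : String × String) :
    List (List (String × String)) :=
  if (PySem.Set.ofList ["anat", "checker", "mask"]).contains kv.1 then
    segs ++ [[kv]]
  else
    match segs.getLast? with   -- 'elif segments: segments[-1].append(kv)'
    | none => segs
    | some s => segs.dropLast ++ [s ++ [kv]]

-- phase 2: one segment to its dict ({'type': k0, 'path': v0} then last-wins assignments)
def pvDictOf (seg : List (String × String)) : PySem.Dict String String :=
  match seg with
  | [] => PySem.Dict.empty   -- unreachable: segments are created nonempty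
  | (k0, v0) :: rest =>
      rest.foldl (fun d kv => d.insert kv.1 kv.2)
        ((PySem.Dict.empty.insert "type" k0).insert "path" v0)

def parse_ordered_image_args_alt (ordered_args : List (String × String)) : List (List (String × String)) :=
  (((ordered_args.foldl pvSegStep []).map pvDictOf).map PySem.Dict.items)

-- ===== PRECONDITION & SPEC =====
def Spec_parse_ordered_image_args (ordered_args : List (String × String)) (out : List (List (String × String))) : Prop := out = parse_ordered_image_args_alt ordered_args
instance (ordered_args : List (String × String)) (out : List (List (String × String))) : Decidable (Spec_parse_ordered_image_args ordered_args out) := by unfold Spec_parse_ordered_image_args; infer_instance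

-- ===== CLAIM (what is proved, stated in full; the proofs are below) =====
def Claim_equal_parse_ordered_image_args : Prop := ∀ (ordered_args : List (String × String)), Dom_parse_ordered_image_args ordered_args → Spec_parse_ordered_image_args ordered_args (parse_ordered_image_args ordered_args)

-- ===== LEMMAS AND PROOFS =====

-- appending a pair to a nonempty segment = inserting into its dict
lemma pvDictOf_append (cur : List (String × String)) (hcur : cur ≠ []) (kv : String × String) :
    pvDictOf (cur ++ [kv]) = (pvDictOf cur).insert kv.1 kv.2 := by
  cases cur with
  | nil => exact absurd rfl hcur
  | cons hd tl =>
    cases hd with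
    | mk k0 v0 => simp [pvDictOf, List.foldl_append]

-- main invariant: A's loop from state (current = dict of cur, images = dicts of ss)
-- computes the dicts of B's segments (ss ++ [cur])
lemma pvLoop_eq (rest : List (String × String)) :
    ∀ (ss : List (List (String × String))) (cur : List (String × String)), cur ≠ [] →
    pvFinishA (rest.foldl pvStepA (some (pvDictOf cur), ss.map pvDictOf))
      = (rest.foldl pvSegStep (ss ++ [cur])).map pvDictOf := by
  induction rest with
  | nil =>
    intro ss cur hcur
    simp [pvFinishA]
  | cons kv rest ih =>
    intro ss cur hcur
    by_cases hf : ((PySem.Set.ofList ["anat", "checker", "mask"]).contains kv.1) = true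
    · have hA : pvStepA (some (pvDictOf cur), ss.map pvDictOf) kv
          = (some (pvDictOf [kv]), (ss ++ [cur]).map pvDictOf) := by
        simp only [pvStepA]; rw [if_pos hf]; simp [pvDictOf]
      have hB : pvSegStep (ss ++ [cur]) kv = (ss ++ [cur]) ++ [[kv]] := by
        simp only [pvSegStep]; rw [if_pos hf]
      simp only [List.foldl_cons, hA, hB]
      exact ih (ss ++ [cur]) [kv] (by simp)
    · have hA : pvStepA (some (pvDictOf cur), ss.map pvDictOf) kv
          = (some (pvDictOf (cur ++ [kv])), ss.map pvDictOf) := by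
        simp only [pvStepA]; rw [if_neg hf]; simp [pvDictOf_append cur hcur kv]
      have hB : pvSegStep (ss ++ [cur]) kv = ss ++ [cur ++ [kv]] := by
        simp only [pvSegStep]; rw [if_neg hf]; simp
      simp only [List.foldl_cons, hA, hB]
      exact ih ss (cur ++ [kv]) (by simp)

-- before the first flag both loops are inert; at the first flag pvLoop_eq takes over
lemma pvStart_eq (rest : List (String × String)) :
    pvFinishA (rest.foldl pvStepA (none, []))
      = (rest.foldl pvSegStep []).map pvDictOf := by
  induction rest with
  | nil => simp [pvFinishA]
  | cons kv rest ih =>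
    by_cases hf : ((PySem.Set.ofList ["anat", "checker", "mask"]).contains kv.1) = true
    · have hA : pvStepA (none, []) kv = (some (pvDictOf [kv]), ([] : List (List (String × String))).map pvDictOf) := by
        simp only [pvStepA]; rw [if_pos hf]; simp [pvDictOf]
      have hB : pvSegStep [] kv = [] ++ [[kv]] := by simp only [pvSegStep]; rw [if_pos hf]
      simp only [List.foldl_cons, hA, hB]
      exact pvLoop_eq rest [] [kv] (by simp)
    · have hA : pvStepA (none, []) kv = (none, []) := by
        simp only [pvStepA]; rw [if_neg hf]
      have hB : pvSegStep [] kv = [] := by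
        simp only [pvSegStep]; rw [if_neg hf]; rfl
      simp only [List.foldl_cons, hA, hB]
      exact ih

-- ===== VERDICT (by name: the statement is the Claim_ definition above) =====
theorem parse_ordered_image_args_spec : Claim_equal_parse_ordered_image_args := by
  intro ordered_args _
  unfold Spec_parse_ordered_image_args parse_ordered_image_args parse_ordered_image_args_alt
  rw [pvStart_eq]
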